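-- pv_equiv track=rewrite | github.com/emilbowry/AICompatibleWEB | tool/t.py | calculate_n_true
-- ===== SOURCE A (Python) =====
-- def calculate_n_true(labels_array, target_pairs):
-- 	"""Calculates the number of unique clusters containing the elements of target_pairs."""
-- 	if not target_pairs or labels_array is None:
-- 		return 0
--
-- 	involved_indices = set(idx for pair in target_pairs for idx in pair)
--
-- 	labels_of_interest = set(
-- 		labels_array[idx] for idx in involved_indices if idx < len(labels_array)
-- 	)
--
-- 	if not involved_indices:
-- 		return 0
--
-- 	return len(labels_of_interest)
-- ===== SOURCE B (Python) =====
-- def calculate_n_true(labels_array, target_pairs):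
--     """Calculates the number of unique clusters containing the elements of target_pairs."""
--     if not target_pairs or labels_array is None:
--         return 0
--     vals = sorted(labels_array[idx] for pair in target_pairs
--                   for idx in pair if idx < len(labels_array))
--     count = 0
--     prev = None
--     for v in vals:
--         if prev is None or v != prev:
--             count += 1
--         prev = v
--     return count
-- ===== Notes on version B (the rewrite author's own statement) =====
-- stated objective: alternative
-- what changed: B replaces the hash-set deduplication (set of involved indices, then set of their labels) with sort-then-scan: it collects the labels with duplicates, sorts them, and counts boundaries between adjacent unequal values in one linear scan.
import Mathlib
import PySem

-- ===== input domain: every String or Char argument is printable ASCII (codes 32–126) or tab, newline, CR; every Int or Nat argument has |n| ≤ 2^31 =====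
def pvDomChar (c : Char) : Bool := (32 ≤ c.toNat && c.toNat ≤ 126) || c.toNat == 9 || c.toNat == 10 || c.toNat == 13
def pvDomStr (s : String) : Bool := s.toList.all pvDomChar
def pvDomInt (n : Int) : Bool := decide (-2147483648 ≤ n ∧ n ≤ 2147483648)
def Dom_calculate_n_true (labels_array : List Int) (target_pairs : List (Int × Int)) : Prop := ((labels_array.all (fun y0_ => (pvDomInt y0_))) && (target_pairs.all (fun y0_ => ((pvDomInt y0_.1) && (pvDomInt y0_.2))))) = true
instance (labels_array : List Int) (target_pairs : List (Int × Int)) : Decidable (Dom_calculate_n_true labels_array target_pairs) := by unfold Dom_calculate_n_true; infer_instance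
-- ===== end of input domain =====

-- B replaces A's hash-set deduplication with sort-then-scan (collect labels, sort, count adjacent-unequal boundaries); same return value (objective: alternative).

-- ===== PORT A =====
-- 'labels_array is None' cannot occur under the type convention (List Int is never None).
def calculate_n_true (labels_array : List Int) (target_pairs : List (Int × Int)) : Int :=
  if target_pairs = [] then 0
  else
    -- involved_indices = set(idx for pair in target_pairs for idx in pair)
    let involved_indices : PySem.Set Int :=
      PySem.Set.ofList (target_pairs.flatMap (fun p => [p.1, p.2]))
    -- labels_of_interest = set(labels_array[idx] for idx in involved_indices if idx < len(labels_array))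
    let labels_of_interest : PySem.Set Int :=
      involved_indices.foldl
        (fun s idx =>
          if idx < PySem.List.len labels_array then
            PySem.Set.add s (PySem.List.pyGetD labels_array idx 0)
          else s)
        PySem.Set.empty
    if involved_indices = [] then 0
    else (labels_of_interest.length : Int)

-- ===== PORT B =====
def calculate_n_true_alt (labels_array : List Int) (target_pairs : List (Int × Int)) : Int :=
  if target_pairs = [] then 0
  else
    -- vals = sorted(labels_array[idx] for pair in target_pairs for idx in pair if idx < len(labels_array))
    let vals : List Int :=
      PySem.List.sorted
        (((target_pairs.flatMap (fun p => [p.1, p.2])).filter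
            (fun idx => decide (idx < PySem.List.len labels_array))).map
          (fun idx => PySem.List.pyGetD labels_array idx 0))
        (fun x => x) false
    -- count = 0; prev = None; for v in vals: if prev is None or v != prev: count += 1; prev = v
    let r : Int × Option Int :=
      vals.foldl
        (fun st v => (if st.2 = some v then st.1 else st.1 + 1, some v))
        ((0 : Int), (none : Option Int))
    r.1

-- ===== PRECONDITION & SPEC =====
-- Pre_ excludes exactly the inputs where Python raises IndexError: an index below -len(labels_array)
-- (it passes the 'idx < len' guard and wraps out of range). Both A and B raise there.
def Pre_calculate_n_true (labels_array : List Int) (target_pairs : List (Int × Int)) : Prop :=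
  ∀ p ∈ target_pairs, -(labels_array.length : Int) ≤ p.1 ∧ -(labels_array.length : Int) ≤ p.2
instance (labels_array : List Int) (target_pairs : List (Int × Int)) : Decidable (Pre_calculate_n_true labels_array target_pairs) := by unfold Pre_calculate_n_true; infer_instance
def pvWitness_calculate_n_true : List Int × (List (Int × Int)) := ([1, 2, 1], [(0, 2), (2, 1)])

def Spec_calculate_n_true (labels_array : List Int) (target_pairs : List (Int × Int)) (out : Int) : Prop := out = calculate_n_true_alt labels_array target_pairs
instance (labels_array : List Int) (target_pairs : List (Int × Int)) (out : Int) : Decidable (Spec_calculate_n_true labels_array target_pairs out) := by unfold Spec_calculate_n_true; infer_instance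

-- ===== CLAIM (what is proved, stated in full; the proofs are below) =====
def Claim_equal_calculate_n_true : Prop := ∀ (labels_array : List Int) (target_pairs : List (Int × Int)), Dom_calculate_n_true labels_array target_pairs → Pre_calculate_n_true labels_array target_pairs → Spec_calculate_n_true labels_array target_pairs (calculate_n_true labels_array target_pairs)

-- ===== LEMMAS AND PROOFS =====

-- the per-index step of A's inner set-build
def pvStep (labels_array : List Int) (s : PySem.Set Int) (idx : Int) : PySem.Set Int :=
  if idx < PySem.List.len labels_array then
    PySem.Set.add s (PySem.List.pyGetD labels_array idx 0)
  else s

lemma pvMem_foldl_step (la : List Int) (ys : List Int) (s : PySem.Set Int) (y : Int) :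
    y ∈ ys.foldl (pvStep la) s ↔
      y ∈ s ∨ ∃ i ∈ ys, i < PySem.List.len la ∧ y = PySem.List.pyGetD la i 0 := by
  induction ys generalizing s with
  | nil => simp
  | cons x xs ih =>
      simp only [List.foldl_cons, ih, pvStep]
      split_ifs with h
      · simp only [PySem.Set.mem_add, List.mem_cons]
        constructor
        · rintro (((hy | rfl) | ⟨i, hi, hlt, rfl⟩))
          · exact Or.inl hy
          · exact Or.inr ⟨x, Or.inl rfl, h, rfl⟩
          · exact Or.inr ⟨i, Or.inr hi, hlt, rfl⟩
        · rintro (hy | ⟨i, (rfl | hi), hlt, rfl⟩)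
          · exact Or.inl (Or.inl hy)
          · exact Or.inl (Or.inr rfl)
          · exact Or.inr ⟨i, hi, hlt, rfl⟩
      · simp only [List.mem_cons]
        constructor
        · rintro (hy | ⟨i, hi, hlt, rfl⟩)
          · exact Or.inl hy
          · exact Or.inr ⟨i, Or.inr hi, hlt, rfl⟩
        · rintro (hy | ⟨i, (rfl | hi), hlt, rfl⟩)
          · exact Or.inl hy
          · exact absurd hlt h
          · exact Or.inr ⟨i, hi, hlt, rfl⟩

lemma pvNodup_foldl_step (la : List Int) (ys : List Int) (s : PySem.Set Int)
    (hs : s.Nodup) : (ys.foldl (pvStep la) s).Nodup := by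
  induction ys generalizing s with
  | nil => exact hs
  | cons x xs ih =>
      refine ih _ ?_
      unfold pvStep
      split_ifs with h
      · exact PySem.Set.nodup_add s _ hs
      · exact hs

lemma pvOfList_ne_nil {xs : List Int} (h : xs ≠ []) : PySem.Set.ofList xs ≠ [] := by
  cases xs with
  | nil => exact absurd rfl h
  | cons x xs =>
      intro hnil
      have : x ∈ PySem.Set.ofList (x :: xs) := PySem.Set.mem_ofList _ _ |>.2 (List.mem_cons_self ..)
      simp [hnil] at this

-- the scan step of B
def pvScan (st : Int × Option Int) (v : Int) : Int × Option Int :=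
  (if st.2 = some v then st.1 else st.1 + 1, some v)

-- number of "boundaries" in a list (first element, plus every adjacent unequal pair)
def pvRuns : List Int → Int
  | [] => 0
  | [_] => 1
  | x :: y :: t => (if x = y then 0 else 1) + pvRuns (y :: t)

lemma pvFoldl_scan_some (l : List Int) : ∀ (p c : Int),
    (l.foldl pvScan (c, some p)).1 = c + pvRuns (p :: l) - 1 := by
  induction l with
  | nil => intro p c; simp [pvRuns]
  | cons v t ih =>
      intro p c
      simp only [List.foldl_cons, pvScan, Option.some.injEq]
      rw [ih]
      show _ = c + pvRuns (p :: v :: t) - 1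
      rw [pvRuns]
      split_ifs with h <;> omega

lemma pvFoldl_scan_none (l : List Int) (c : Int) :
    (l.foldl pvScan (c, none)).1 = c + pvRuns l := by
  cases l with
  | nil => simp [pvRuns]
  | cons v t =>
      simp only [List.foldl_cons, pvScan]
      rw [if_neg (by simp), pvFoldl_scan_some]
      omega

lemma pvRuns_sorted (l : List Int) (h : l.Pairwise (· ≤ ·)) :
    pvRuns l = (l.dedup.length : Int) := by
  induction l with
  | nil => simp [pvRuns]
  | cons x t ih =>
      cases t with
      | nil => simp [pvRuns]
      | cons y u =>
          have hxy : x ≤ y := (List.pairwise_cons.1 h).1 y (List.mem_cons_self ..)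
          have hxall : ∀ z ∈ y :: u, x ≤ z := (List.pairwise_cons.1 h).1
          have hyall : ∀ z ∈ u, y ≤ z :=
            (List.pairwise_cons.1 (List.pairwise_cons.1 h).2).1
          have htail := ih (List.pairwise_cons.1 h).2
          rw [pvRuns]
          split_ifs with hxy'
          · subst hxy'
            rw [List.dedup_cons_of_mem (List.mem_cons_self ..)]
            omega
          · have hxnot : x ∉ y :: u := by
              intro hx
              rcases List.mem_cons.1 hx with rfl | hxu
              · exact hxy' rfl
              · exact hxy' (le_antisymm hxy (hyall x hxu))
            rw [List.dedup_cons_of_notMem hxnot]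
            simp only [List.length_cons]
            rw [htail]; push_cast; ring

-- ===== VERDICT =====
theorem calculate_n_true_spec : Claim_equal_calculate_n_true := by
  intro la tp _ _
  unfold Spec_calculate_n_true calculate_n_true calculate_n_true_alt
  by_cases htp : tp = []
  · simp [htp]
  · simp only [if_neg htp]
    set xs := tp.flatMap (fun p => [p.1, p.2]) with hxs
    have hxs_ne : xs ≠ [] := by
      cases tp with
      | nil => exact absurd rfl htp
      | cons p ps => simp [hxs, List.flatMap_cons]
    rw [if_neg (pvOfList_ne_nil hxs_ne)]
    -- the list of labels B collects (with duplicates)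
    set L : List Int :=
      (xs.filter (fun idx => decide (idx < PySem.List.len la))).map
        (fun idx => PySem.List.pyGetD la idx 0) with hL
    -- A's side: its set is a nodup list with the same members as L, hence ~ L.dedup
    set Aset := (PySem.Set.ofList xs).foldl (pvStep la) PySem.Set.empty with hAset
    have hnodA : Aset.Nodup := pvNodup_foldl_step la _ _ List.nodup_nil
    have hmemA : ∀ y, y ∈ Aset ↔ y ∈ L := by
      intro y
      rw [hAset, pvMem_foldl_step, hL]
      simp only [List.mem_map, List.mem_filter, decide_eq_true_eq, PySem.Set.mem_ofList]
      constructor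
      · rintro (h | ⟨i, hi, hlt, rfl⟩)
        · simp [PySem.Set.empty] at h
        · exact ⟨i, ⟨hi, hlt⟩, rfl⟩
      · rintro ⟨i, ⟨hi, hlt⟩, rfl⟩
        exact Or.inr ⟨i, hi, hlt, rfl⟩
    have hpermA : Aset.Perm L.dedup := by
      refine (List.perm_ext_iff_of_nodup hnodA L.nodup_dedup).2 ?_
      intro y; rw [hmemA]; exact (List.mem_dedup).symm
    -- B's side: the scan over sorted L counts (sorted L).dedup.length = L.dedup.length
    set S := PySem.List.sorted L (fun x => x) false with hS
    have hSperm : S.Perm L := PySem.List.sorted_perm L (fun x => x) false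
    have hSpair : S.Pairwise (· ≤ ·) := PySem.List.sorted_pairwise L (fun x => x)
    have hscan : (S.foldl pvScan ((0 : Int), (none : Option Int))).1 = (S.dedup.length : Int) := by
      rw [pvFoldl_scan_none, pvRuns_sorted S hSpair]; ring
    have hdedup : S.dedup.length = L.dedup.length := (hSperm.dedup).length_eq
    show ((Aset.length : Int)) = (S.foldl pvScan ((0:Int), (none : Option Int))).1
    rw [hscan, hdedup, hpermA.length_eq]
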